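-- pv_equiv track=rewrite | github.com/jcolinpatrick/kryptos | scripts/transposition/columnar/e_s_06_double_columnar.py | score_model2_single
-- ===== SOURCE A (Python) =====
-- from collections import defaultdict
--
-- def score_model2_single(key_positions, key_values, period):
--     """Score 'sub∘trans' model for a single candidate.
--
--     key_positions: shape (24,) — where the key lives (varies per perm)
--     key_values: shape (24,) — key values
--     Returns: int — consistency score
--     """
--     groups = defaultdict(list)
--     for idx in range(len(key_positions)):
--         groups[int(key_positions[idx]) % period].append(idx)
--
--     total = 0
--     for indices in groups.values():
--         k = len(indices)
--         if k == 1: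
--             total += 1
--             continue
--         vals = [int(key_values[idx]) for idx in indices]
--         # Majority count
--         from collections import Counter
--         best_count = Counter(vals).most_common(1)[0][1]
--         total += best_count
--     return total
-- ===== SOURCE B (Python) =====
-- def score_model2_single(key_positions, key_values, period):
--     """Brute-force restatement: build (pos % period, value) pairs once; for each
--     distinct group (first-occurrence order) take the maximum pair multiplicity
--     via list.count — no dict-of-lists, no Counter, no singleton shortcut."""
--     pairs = [(int(p) % period, int(v)) for p, v in zip(key_positions, key_values)]
--     total = 0
--     for g in dict.fromkeys(p for p, _ in pairs):
--         grp = [q for q in pairs if q[0] == g]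
--         total += max(grp.count(q) for q in grp)
--     return total
-- ===== Notes on version B (the rewrite author's own statement) =====
-- stated objective: alternative
-- what changed: Replaces A's two-stage dict-of-index-lists plus per-group Counter/most_common (with a singleton shortcut) by a dictionary-free brute-force scan: one list of (pos%period, value) pairs, distinct groups via dict.fromkeys, and each group's score as the maximum pair multiplicity computed with list.count; trades A's linear-time hashing for a quadratic-in-group-size scan. …
-- outside the precondition, e.g. on score_model2_single([0, 1], [], 2): A returns 2, B returns 0
import Mathlib
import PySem

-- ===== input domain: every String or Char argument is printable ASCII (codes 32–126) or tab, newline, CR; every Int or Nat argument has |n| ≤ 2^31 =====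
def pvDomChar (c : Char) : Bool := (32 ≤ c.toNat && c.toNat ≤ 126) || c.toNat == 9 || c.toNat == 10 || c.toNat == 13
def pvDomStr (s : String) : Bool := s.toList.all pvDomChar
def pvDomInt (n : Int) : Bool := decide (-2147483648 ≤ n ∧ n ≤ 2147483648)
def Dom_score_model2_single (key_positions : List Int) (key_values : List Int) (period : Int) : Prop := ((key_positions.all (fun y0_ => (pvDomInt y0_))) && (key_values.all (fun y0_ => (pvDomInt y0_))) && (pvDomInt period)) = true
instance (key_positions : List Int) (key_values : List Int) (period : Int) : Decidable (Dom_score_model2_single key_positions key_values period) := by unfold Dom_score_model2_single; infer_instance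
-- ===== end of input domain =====

-- B replaces A's dict-of-index-lists + per-group Counter with a dictionary-free pair list scanned per distinct group via list.count; alternative decomposition, not faster.

-- shared primitive combinations: group key and key value of an index
def pvKey (key_positions : List Int) (period : Int) (idx : Int) : Int :=
  PySem.Int.mod (PySem.List.pyGetD key_positions idx 0) period
def pvVal (key_values : List Int) (idx : Int) : Int :=
  PySem.List.pyGetD key_values idx 0
-- max of a dict's values (Counter.most_common(1)[0][1])
def pvMaxVals (inner : PySem.Dict Int Int) : Int :=
  (PySem.List.max? inner.values (fun c => c)).getD 0

-- ===== PORT A =====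
def score_model2_single (key_positions : List Int) (key_values : List Int) (period : Int) : Int :=
  let groups : PySem.Dict Int (List Int) :=
    (PySem.List.pyRange 0 (PySem.List.len key_positions) 1).foldl
      (fun d idx => d.modify (pvKey key_positions period idx) [] (· ++ [idx]))
      PySem.Dict.empty
  groups.values.foldl
    (fun total indices =>
      if indices.length = 1 then total + 1
      else total + pvMaxVals (PySem.Dict.counter (indices.map (pvVal key_values))))
    0

-- ===== PORT B =====
def score_model2_single_alt (key_positions : List Int) (key_values : List Int) (period : Int) : Int :=
  let pairs : List (Int × Int) :=
    (key_positions.zip key_values).map (fun pv => (PySem.Int.mod pv.1 period, pv.2))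
  (PySem.List.dedup (pairs.map (fun p => p.1))).foldl
    (fun total g =>
      let grp := pairs.filter (fun q => q.1 == g)
      total + (PySem.List.max? (grp.map (fun q => (PySem.List.count grp q : Int))) (fun c => c)).getD 0)
    0

-- ===== PRECONDITION & SPEC =====
-- Pre_ excludes period == 0 on nonempty input (A and B both raise ZeroDivisionError) and
-- key_values shorter than key_positions, where A raises IndexError except in the all-singleton
-- corner in which it never reads key_values while B's zip truncates: neither value is specified
-- for mismatched lengths.
def Pre_score_model2_single (key_positions : List Int) (key_values : List Int) (period : Int) : Prop :=
  key_positions.length ≤ key_values.length ∧ (key_positions = [] ∨ period ≠ 0)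
instance (key_positions : List Int) (key_values : List Int) (period : Int) : Decidable (Pre_score_model2_single key_positions key_values period) := by unfold Pre_score_model2_single; infer_instance
def pvWitness_score_model2_single : List Int × List Int × Int := ([0, 1, 2, 5], [4, 4, 7, 4], 2)

def Spec_score_model2_single (key_positions : List Int) (key_values : List Int) (period : Int) (out : Int) : Prop := out = score_model2_single_alt key_positions key_values period
instance (key_positions : List Int) (key_values : List Int) (period : Int) (out : Int) : Decidable (Spec_score_model2_single key_positions key_values period out) := by unfold Spec_score_model2_single; infer_instance

-- ===== CLAIM (what is proved, stated in full; the proofs are below) =====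
def Claim_equal_score_model2_single : Prop := ∀ (key_positions : List Int) (key_values : List Int) (period : Int), Dom_score_model2_single key_positions key_values period → Pre_score_model2_single key_positions key_values period → Spec_score_model2_single key_positions key_values period (score_model2_single key_positions key_values period)

-- ===== LEMMAS AND PROOFS =====

-- a one-element counter's maximum count is 1
lemma pvMaxVals_counter_singleton (v : Int) : pvMaxVals (PySem.Dict.counter [v]) = 1 := by
  have h : (PySem.Dict.counter [v]).values = [1] := by
    simp [PySem.Dict.values, PySem.Dict.items_counter]
    exact ⟨v, by simp [PySem.Set.ofList, PySem.Set.add, PySem.Set.empty], by simp⟩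
  simp [pvMaxVals, h]
  decide

-- A's per-group score equals the max count of the group's counter, singleton shortcut included
lemma pvScore_eq (key_values : List Int) (l : List Int) :
    (if l.length = 1 then (1 : Int) else pvMaxVals (PySem.Dict.counter (l.map (pvVal key_values))))
      = pvMaxVals (PySem.Dict.counter (l.map (pvVal key_values))) := by
  by_cases h : l.length = 1
  · match l, h with
    | [x], _ => simp [pvMaxVals_counter_singleton]
  · simp [h]

-- A's accumulation loop over the groups is the sum of the per-group scores
lemma pv_foldA (key_values : List Int) (vs : List (List Int)) (t : Int) :
    vs.foldl
      (fun total indices =>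
        if indices.length = 1 then total + 1
        else total + pvMaxVals (PySem.Dict.counter (indices.map (pvVal key_values)))) t
      = t + (vs.map (fun l => pvMaxVals (PySem.Dict.counter (l.map (pvVal key_values))))).sum := by
  induction vs generalizing t with
  | nil => simp
  | cons l vs ih =>
      simp only [List.foldl_cons, List.map_cons, List.sum_cons, ih]
      rw [← pvScore_eq key_values l]
      split_ifs <;> ring

-- max (getD 0) of two nonempty Int lists with the same members agree
lemma pv_max_getD_eq (xs ys : List Int) (hx : xs ≠ []) (hy : ys ≠ [])
    (h : ∀ c, c ∈ xs ↔ c ∈ ys) :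
    (PySem.List.max? xs (fun c => c)).getD 0 = (PySem.List.max? ys (fun c => c)).getD 0 := by
  cases hmx : PySem.List.max? xs (fun c => c) with
  | none => exact absurd ((PySem.List.max?_eq_none_iff xs _).1 hmx) hx
  | some mx =>
    cases hmy : PySem.List.max? ys (fun c => c) with
    | none => exact absurd ((PySem.List.max?_eq_none_iff ys _).1 hmy) hy
    | some my =>
      have h1 : mx ≤ my := PySem.List.max?_isMax hmy mx ((h mx).1 (PySem.List.max?_mem hmx))
      have h2 : my ≤ mx := PySem.List.max?_isMax hmx my ((h my).2 (PySem.List.max?_mem hmy))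
      simp [le_antisymm h1 h2]

-- ===== VERDICT (by name: the statement is the Claim_ definition above) =====
theorem score_model2_single_spec : Claim_equal_score_model2_single := by
  intro key_positions key_values period _ hpre
  obtain ⟨hlen, -⟩ := hpre
  simp only [Spec_score_model2_single, score_model2_single, score_model2_single_alt]
  set n := key_positions.length with hn
  set k : ℕ → Int := fun i => pvKey key_positions period (i : Int) with hkdef
  set v : ℕ → Int := fun i => pvVal key_values (i : Int) with hvdef
  -- B's pair list is the indexwise (key, value) list
  have hpairs : (key_positions.zip key_values).map
      (fun pv => (PySem.Int.mod pv.1 period, pv.2))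
      = (List.range n).map (fun i => (k i, v i)) := by
    apply List.ext_getElem
    · simp; omega
    · intro i h1 h2
      have hi : i < n := by simp at h2; omega
      simp only [List.getElem_map, List.getElem_zip, List.getElem_range]
      simp [hkdef, hvdef, pvKey, pvVal, PySem.List.pyGetD_natCast, List.getD,
        List.getElem?_eq_getElem hi, List.getElem?_eq_getElem (lt_of_lt_of_le hi hlen)]
  rw [hpairs]
  -- A's grouping dict, characterised
  have hlenA : PySem.List.len key_positions = (n : Int) := rfl
  rw [hlenA, PySem.List.pyRange_zero_natCast, List.foldl_map]
  set D : PySem.Dict Int (List Int) :=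
    (List.range n).foldl (fun d i => d.modify (k i) [] (· ++ [(i : Int)])) PySem.Dict.empty with hD
  have hkeys : D.keys = PySem.Set.ofList ((List.range n).map k) := by
    have := PySem.Dict.keys_foldl_modify_key (List.range n) k []
      (fun _ (i : ℕ) (l : List Int) => l ++ [(i : Int)]) PySem.Dict.empty
    simpa [PySem.Set.update_empty, PySem.Dict.keys_empty] using this
  have hnd : D.keys.Nodup := hkeys ▸ PySem.Set.nodup_ofList _
  have hgetD : ∀ g, D.getD g [] = ((List.range n).filter (fun i => k i == g)).map (fun (i : ℕ) => (i : Int)) := by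
    intro g
    have hD2 : D = ((List.range n).map (fun i => (k i, (i : Int)))).foldl
        (fun d p => d.modify p.1 [] (· ++ [p.2])) PySem.Dict.empty := by
      rw [List.foldl_map]
    rw [hD2, PySem.Dict.getD_foldl_modify_append, PySem.Dict.getD_empty, List.filter_map]
    simp [Function.comp_def, List.map_map]
  -- both sides as sums over the distinct groups
  rw [PySem.Dict.values_eq_map_keys D hnd [], pv_foldA, zero_add, hkeys]
  rw [List.map_map, PySem.List.dedup_eq_ofList]
  have hsumB : ∀ (G : List Int) (t : Int),
      G.foldl (fun total g =>
        total + (PySem.List.max?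
          ((((List.range n).map (fun i => (k i, v i))).filter (fun q => q.1 == g)).map
            (fun q => (PySem.List.count (((List.range n).map (fun i => (k i, v i))).filter (fun q => q.1 == g)) q : Int)))
          (fun c => c)).getD 0) t
      = t + (G.map (fun g => (PySem.List.max?
          ((((List.range n).map (fun i => (k i, v i))).filter (fun q => q.1 == g)).map
            (fun q => (PySem.List.count (((List.range n).map (fun i => (k i, v i))).filter (fun q => q.1 == g)) q : Int)))
          (fun c => c)).getD 0)).sum := by
    intro G
    induction G with
    | nil => simp
    | cons g G ih => intro t; simp only [List.foldl_cons, List.map_cons, List.sum_cons, ih]; ring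
  rw [hsumB, zero_add]
  -- per-group agreement
  rw [show List.map (fun p => p.1) (List.map (fun i => (k i, v i)) (List.range n))
      = List.map k (List.range n) from by simp only [List.map_map]; rfl]
  refine congrArg List.sum (List.map_congr_left fun g hg => ?_)
  have hmemg : ∃ i ∈ List.range n, k i = g := by
    have hgm : g ∈ (List.range n).map k := (PySem.Set.mem_ofList _ g).1 hg
    simpa using hgm
  set idx : List ℕ := (List.range n).filter (fun i => k i == g) with hidx
  have hidxne : idx ≠ [] := by
    obtain ⟨i, hi, hik⟩ := hmemg
    intro hnil
    have : i ∈ idx := by simp [hidx, List.mem_filter, hi, hik]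
    simp [hnil] at this
  set vals : List Int := idx.map v with hvals
  have hgrp : ((List.range n).map (fun i => (k i, v i))).filter (fun q => q.1 == g)
      = idx.map (fun i => (g, v i)) := by
    rw [List.filter_map]
    refine List.map_congr_left fun i hi => ?_
    have : k i = g := by
      have := List.of_mem_filter hi
      simpa using this
    simp [this]
  -- A's value
  simp only [Function.comp_apply]
  rw [hgetD g, List.map_map]
  have hAvals : ((List.range n).filter (fun i => k i == g)).map (pvVal key_values ∘ fun (i : ℕ) => (i : Int)) = vals := by
    simp [hvals, hvdef, hidx, Function.comp_def]
  rw [hAvals, hgrp]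
  -- B's counts are the value-multiplicities within the group
  have hcnt : (idx.map (fun i => (g, v i))).map
      (fun q => (PySem.List.count (idx.map (fun i => (g, v i))) q : Int))
      = vals.map (fun c => ((List.count c vals : ℕ) : Int)) := by
    rw [List.map_map, hvals, List.map_map]
    refine List.map_congr_left fun i _ => ?_
    simp only [Function.comp_def, PySem.List.count_eq]
    congr 1
    rw [List.count, List.count, List.countP_map, List.countP_map]
    refine List.countP_congr fun j _ => ?_
    simp
  rw [hcnt]
  -- A's counter values are the same multiset of counts on the distinct values
  have hctr : (PySem.Dict.counter vals).values
      = (PySem.Set.ofList vals).map (fun c => ((List.count c vals : ℕ) : Int)) := by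
    simp [PySem.Dict.values, PySem.Dict.items_counter, List.map_map, Function.comp_def]
  have hvalsne : vals ≠ [] := by
    simp [hvals, hidxne]
  rw [show pvMaxVals (PySem.Dict.counter vals)
      = (PySem.List.max? ((PySem.Set.ofList vals).map (fun c => ((List.count c vals : ℕ) : Int))) (fun c => c)).getD 0 by
        rw [pvMaxVals, hctr]]
  refine pv_max_getD_eq _ _ ?_ ?_ ?_
  · intro hnil
    rcases List.exists_mem_of_ne_nil vals hvalsne with ⟨c, hc⟩
    have : c ∈ PySem.Set.ofList vals := (PySem.Set.mem_ofList _ c).2 hc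
    have : ((List.count c vals : ℕ) : Int) ∈ (PySem.Set.ofList vals).map (fun c => ((List.count c vals : ℕ) : Int)) :=
      List.mem_map_of_mem this
    simp [hnil] at this
  · simpa using hvalsne
  · intro c
    simp [List.mem_map, PySem.Set.mem_ofList]
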